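-- pv_equiv track=rewrite | github.com/wasd314/consecutive-power-sum | power/sol3_py/main.py | solve_3
-- ===== SOURCE A (Python) =====
-- import bisect as bs
--
-- def power_sum(e: int, l: int, r: int = None):
--     # cubic sum of [i, r) or [0, l)
--     if r is not None:
--         return power_sum(e, r) - power_sum(e, l)
--     if e == 2:
--         return l * (l - 1) * (2 * l - 1) // 6
--     if e == 3:
--         return l * (l - 1) // 2 * l * (l - 1) // 2
--     if e == 4:
--         return l * (l - 1) * (2 * l - 1) * (3 * l * l - 3 * l - 1) // 30
--
-- def solve_3(n: int):
--     ans = []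
--     for w in range(1, n + 1):
--         if power_sum(3, 1, w + 1) > n:
--             break
--         if 4 * n % w:
--             continue
--         r = 1
--         while power_sum(3, r, r + w) <= n:
--             r *= 2
--         l = bs.bisect_left(range(r + 1), n, key=lambda l: power_sum(3, l, l + w), lo=1)
--         if power_sum(3, l, l + w) == n:
--             ans.append((3, l, l + w - 1))
--     return ans
-- ===== SOURCE B (Python) =====
-- def solve_3(n: int):
--     # Two-pointer sliding window over consecutive cubes, then sort by width.
--     ans = []
--     l = r = 1
--     s = 0  # sum of i**3 for i in range(l, r)
--     while not (l == r and l * l * l > n):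
--         if s < n:
--             s += r * r * r
--             r += 1
--         else:
--             if s == n:
--                 ans.append((3, l, r - 1))
--             s -= l * l * l
--             l += 1
--     ans.sort(key=lambda t: t[2] - t[1])
--     return ans
-- ===== Notes on version B (the rewrite author's own statement) =====
-- stated objective: alternative
-- what changed: A searches per candidate width with a divisibility filter, exponential doubling and a binary search for the start; B runs one two-pointer sliding window over consecutive cubes, collecting hits in start order and sorting them by width at the end.
import Mathlib
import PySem

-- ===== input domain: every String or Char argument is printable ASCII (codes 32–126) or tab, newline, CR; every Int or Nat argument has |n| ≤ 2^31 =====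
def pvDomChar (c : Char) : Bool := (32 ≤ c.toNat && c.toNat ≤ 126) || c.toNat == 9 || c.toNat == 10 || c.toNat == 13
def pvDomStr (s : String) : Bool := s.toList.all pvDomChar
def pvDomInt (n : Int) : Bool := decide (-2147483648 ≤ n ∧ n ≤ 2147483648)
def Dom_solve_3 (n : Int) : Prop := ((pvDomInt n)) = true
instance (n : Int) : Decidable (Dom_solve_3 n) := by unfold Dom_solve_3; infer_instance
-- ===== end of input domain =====

-- B replaces A's per-width doubling + binary search with a single two-pointer sliding
-- window over consecutive cubes, sorted by width at the end (objective: alternative).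

-- ===== PORT A =====
-- power_sum(e, l): Python returns None for e ∉ {2,3,4}; solve_3 only calls e = 3,
-- so that unreachable branch is ported as 0.
def pvPow1 (e l : Int) : Int :=
  if e = 2 then PySem.Int.floordiv (l * (l - 1) * (2 * l - 1)) 6
  else if e = 3 then PySem.Int.floordiv (PySem.Int.floordiv (l * (l - 1)) 2 * l * (l - 1)) 2
  else if e = 4 then PySem.Int.floordiv (l * (l - 1) * (2 * l - 1) * (3 * l * l - 3 * l - 1)) 30
  else 0

-- power_sum(e, l, r) = power_sum(e, r) - power_sum(e, l)
def pvPow (e l r : Int) : Int := pvPow1 e r - pvPow1 e l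

-- while power_sum(3, r, r + w) <= n: r *= 2      (fuel is only a totality guard)
def pvDoubleR (n w : Int) : Nat → Int → Int
  | 0, r => r
  | fuel + 1, r => if pvPow 3 r (r + w) ≤ n then pvDoubleR n w fuel (r * 2) else r

-- bisect.bisect_left(range(r+1), n, key=lambda l: power_sum(3, l, l+w), lo=1):
-- CPython's loop, with a[mid] = mid  (fuel is only a totality guard)
def pvBisect (n w : Int) : Nat → Int → Int → Int
  | 0, lo, _ => lo
  | fuel + 1, lo, hi =>
    if lo < hi then
      let mid := PySem.Int.floordiv (lo + hi) 2
      if pvPow 3 mid (mid + w) < n then pvBisect n w fuel (mid + 1) hi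
      else pvBisect n w fuel lo mid
    else lo

-- the 'for w in range(1, n + 1)' loop of solve_3, with break / continue as early
-- returns; cnt counts the iterations left (range(1, n+1) is lazy in Python, so the
-- loop is ported as a countdown over the remaining widths, w being the current one)
def pvLoopA (n : Int) : Nat → Int → List (Int × Int × Int) → List (Int × Int × Int)
  | 0, _, ans => ans
  | cnt + 1, w, ans =>
    if n < pvPow 3 1 (w + 1) then ans
    else if PySem.Int.mod (4 * n) w ≠ 0 then pvLoopA n cnt (w + 1) ans
    else
      let r := pvDoubleR n w (n.toNat + 2) 1
      let l := pvBisect n w r.toNat 1 (r + 1)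
      if pvPow 3 l (l + w) = n then pvLoopA n cnt (w + 1) (ans ++ [(3, l, l + w - 1)])
      else pvLoopA n cnt (w + 1) ans

def solve_3 (n : Int) : List (Int × Int × Int) :=
  pvLoopA n n.toNat 1 []

-- ===== PORT B =====
-- the two-pointer while loop of B; s is the running sum of cubes in [l, r)
-- (fuel is only a totality guard)
def pvLoopB (n : Int) : Nat → Int → Int → Int → List (Int × Int × Int) → List (Int × Int × Int)
  | 0, _, _, _, ans => ans
  | fuel + 1, l, r, s, ans =>
    if l = r ∧ n < l * l * l then ans
    else if s < n then pvLoopB n fuel l (r + 1) (s + r * r * r) ans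
    else if s = n then pvLoopB n fuel (l + 1) r (s - l * l * l) (ans ++ [(3, l, r - 1)])
    else pvLoopB n fuel (l + 1) r (s - l * l * l) ans

def solve_3_alt (n : Int) : List (Int × Int × Int) :=
  PySem.List.sorted (pvLoopB n (2 * n + 4).toNat 1 1 0 []) (fun t => t.2.2 - t.2.1) false

-- ===== PRECONDITION & SPEC =====
def Spec_solve_3 (n : Int) (out : List (Int × Int × Int)) : Prop := out = solve_3_alt n
instance (n : Int) (out : List (Int × Int × Int)) : Decidable (Spec_solve_3 n out) := by unfold Spec_solve_3; infer_instance

-- ===== CLAIM (what is proved, stated in full; the proofs are below) =====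
def Claim_equal_solve_3 : Prop := ∀ (n : Int), Dom_solve_3 n → Spec_solve_3 n (solve_3 n)

-- ===== LEMMAS AND PROOFS =====

-- cube-sum of the window [l, l+w): w consecutive cubes starting at l
def pvG (w l : Int) : Int := pvPow 3 l (l + w)

-- a tuple (3, l, r) recording a solution: 1 ≤ l ≤ r and l³ + … + r³ = n
def IsSol (n : Int) (t : Int × Int × Int) : Prop :=
  t.1 = 3 ∧ 1 ≤ t.2.1 ∧ t.2.1 ≤ t.2.2 ∧ pvG (t.2.2 - t.2.1 + 1) t.2.1 = n

lemma pvPow1_sq (l : Int) : pvPow1 3 l * 4 = (l * (l - 1)) ^ 2 := by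
  unfold pvPow1
  norm_num
  obtain ⟨k, hk⟩ := Int.even_mul_succ_self (l - 1)
  have hlk : l * (l - 1) = 2 * k := by linarith [hk]; 
  rw [hlk]
  have h1 : 2 * k / 2 = k := by omega
  rw [h1]
  have h2 : k * l * (l - 1) = 2 * (k * k) := by linear_combination k * hlk
  rw [h2]
  have h3 : 2 * (k * k) / 2 = k * k := by omega
  rw [h3]
  ring

lemma pvG_formula (w l : Int) :
    4 * pvG w l = ((l + w) * (l + w - 1)) ^ 2 - (l * (l - 1)) ^ 2 := by
  have h1 := pvPow1_sq (l + w)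
  have h2 := pvPow1_sq l
  unfold pvG pvPow
  linarith

lemma pvG_zero (l : Int) : pvG 0 l = 0 := by
  unfold pvG pvPow; rw [add_zero]; ring

lemma pvG_succ_w (w l : Int) : pvG (w + 1) l = pvG w l + (l + w) ^ 3 := by
  have h1 := pvG_formula (w + 1) l
  have h2 := pvG_formula w l
  nlinarith [h1, h2]

lemma pvG_succ_l (w l : Int) : pvG w (l + 1) = pvG w l + (l + w) ^ 3 - l ^ 3 := by
  have h1 := pvG_formula w (l + 1)
  have h2 := pvG_formula w l
  nlinarith [h1, h2]

lemma cube_lt_cube {a b : Int} (h : a < b) : a ^ 3 < b ^ 3 := by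
  nlinarith [sq_nonneg (a + b), sq_nonneg a, sq_nonneg b, sq_nonneg (a - b)]

lemma self_le_cube {a : Int} (h : 1 ≤ a) : a ≤ a ^ 3 := by
  have h2 : 1 ≤ a * a := by nlinarith
  nlinarith [h2]

lemma pvG_strictMono_l {w : Int} (hw : 1 ≤ w) : StrictMono (fun l => pvG w l) := by
  apply strictMono_int_of_lt_succ
  intro l
  have h := pvG_succ_l w l
  have hc : l ^ 3 < (l + w) ^ 3 := cube_lt_cube (by omega)
  show pvG w l < pvG w (l + 1)
  linarith

lemma pvG_mono_w {l w1 w2 : Int} (hl : 1 ≤ l) (h0 : 0 ≤ w1) (h : w1 ≤ w2) :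
    pvG w1 l ≤ pvG w2 l := by
  have key : ∀ k : Nat, pvG w1 l ≤ pvG (w1 + (k : Int)) l := by
    intro k
    induction k with
    | zero => simp
    | succ m ih =>
      have hs : pvG (w1 + (m : Int) + 1) l = pvG (w1 + (m : Int)) l + (l + (w1 + (m : Int))) ^ 3 :=
        pvG_succ_w _ _
      have hc : (0:Int) < (l + (w1 + (m : Int))) ^ 3 := pow_pos (by omega) 3
      push_cast
      rw [show w1 + ((m : Int) + 1) = w1 + (m : Int) + 1 by ring]
      linarith
  have hk : w2 = w1 + ((w2 - w1).toNat : Int) := by omega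
  rw [hk]
  exact key _

lemma pvG_strict_w {l w1 w2 : Int} (hl : 1 ≤ l) (h0 : 0 ≤ w1) (h : w1 < w2) :
    pvG w1 l < pvG w2 l := by
  have h1 : pvG (w1 + 1) l ≤ pvG w2 l := pvG_mono_w hl (by omega) (by omega)
  have hs := pvG_succ_w w1 l
  have hc : (0:Int) < (l + w1) ^ 3 := pow_pos (by omega) 3
  linarith

lemma pvG_one (l : Int) : pvG 1 l = l ^ 3 := by
  have h := pvG_succ_w 0 l
  have h0 := pvG_zero l
  rw [zero_add] at h
  rw [h, h0, add_zero, zero_add]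

lemma pvG_nonneg {w l : Int} (hl : 1 ≤ l) (hw : 0 ≤ w) : 0 ≤ pvG w l := by
  have := pvG_mono_w hl le_rfl hw
  rw [pvG_zero] at this
  exact this

lemma cube_le_pvG {w l : Int} (hl : 1 ≤ l) (hw : 1 ≤ w) : l ^ 3 ≤ pvG w l := by
  have := pvG_mono_w hl (by norm_num) hw
  rw [pvG_one] at this
  exact this

lemma self_le_pvG_one {w : Int} (hw : 0 ≤ w) : w ≤ pvG w 1 := by
  have key : ∀ k : Nat, (k : Int) ≤ pvG (k : Int) 1 := by
    intro k
    induction k with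
    | zero => simp [pvG_zero]
    | succ m ih =>
      have hs : pvG ((m : Int) + 1) 1 = pvG (m : Int) 1 + (1 + (m : Int)) ^ 3 := pvG_succ_w (m : Int) 1
      have hone : (1:Int) ≤ 1 + (m : Int) := by omega
      have hc : (1:Int) + (m : Int) ≤ (1 + (m : Int)) ^ 3 := self_le_cube hone
      push_cast
      linarith
  have := key w.toNat
  rwa [show ((w.toNat : Int)) = w by omega] at this

lemma w_dvd_four_pvG (w l : Int) : w ∣ 4 * pvG w l := by
  refine ⟨(2 * l + w - 1) * ((l + w) * (l + w - 1) + l * (l - 1)), ?_⟩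
  have h := pvG_formula w l
  nlinarith [h]

-- width of a solution of total n is at most n
lemma sol_width_le {n : Int} {t : Int × Int × Int} (h : IsSol n t) :
    t.2.2 - t.2.1 + 1 ≤ n ∧ pvG (t.2.2 - t.2.1 + 1) 1 ≤ n := by
  obtain ⟨-, hl, hlr, hg⟩ := h
  have hw : 1 ≤ t.2.2 - t.2.1 + 1 := by omega
  have h1 : pvG (t.2.2 - t.2.1 + 1) 1 ≤ pvG (t.2.2 - t.2.1 + 1) t.2.1 :=
    (pvG_strictMono_l hw).monotone hl
  have h2 : t.2.2 - t.2.1 + 1 ≤ pvG (t.2.2 - t.2.1 + 1) 1 := self_le_pvG_one (by omega)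
  omega

-- no solution starts at or above l once l³ > n
lemma sol_start_lt {n l : Int} (hl : 1 ≤ l) (hgt : n < l ^ 3) {t : Int × Int × Int}
    (h : IsSol n t) : t.2.1 < l := by
  obtain ⟨-, hl1, hlr, hg⟩ := h
  by_contra hge
  push_neg at hge
  have h1 : l ^ 3 ≤ t.2.1 ^ 3 := by
    rcases eq_or_lt_of_le hge with h | h
    · rw [h]
    · exact le_of_lt (cube_lt_cube h)
  have h2 : t.2.1 ^ 3 ≤ pvG (t.2.2 - t.2.1 + 1) t.2.1 := cube_le_pvG hl1 (by omega)
  omega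

lemma pvDoubleR_spec {n w : Int} (hw : 1 ≤ w) :
    ∀ (fuel : Nat) (r : Int), 1 ≤ r → (n + 1 - r).toNat ≤ fuel →
      1 ≤ pvDoubleR n w fuel r ∧ n < pvG w (pvDoubleR n w fuel r) := by
  intro fuel
  induction fuel with
  | zero =>
    intro r hr hf
    have h1 : r ≤ r ^ 3 := self_le_cube hr
    have h2 : r ^ 3 ≤ pvG w r := cube_le_pvG hr hw
    simp only [pvDoubleR]
    exact ⟨hr, by omega⟩
  | succ f ih =>
    intro r hr hf
    by_cases hc : pvPow 3 r (r + w) ≤ n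
    · have hgr : pvG w r ≤ n := hc
      have h1 : r ≤ r ^ 3 := self_le_cube hr
      have h2 : r ^ 3 ≤ pvG w r := cube_le_pvG hr hw
      have hrn : r ≤ n := by omega
      have := ih (r * 2) (by omega) (by omega)
      simpa only [pvDoubleR, if_pos hc] using this
    · simp only [pvDoubleR, if_neg hc]
      push_neg at hc
      exact ⟨hr, hc⟩

lemma pvBisect_ge (n w : Int) : ∀ (fuel : Nat) (lo hi : Int), lo ≤ pvBisect n w fuel lo hi := by
  intro fuel
  induction fuel with
  | zero => intro lo hi; simp [pvBisect]
  | succ f ih =>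
    intro lo hi
    simp only [pvBisect]
    by_cases hlt : lo < hi
    · rw [if_pos hlt]
      have hmid := PySem.Int.floordiv_two_mid_bounds (le_of_lt hlt)
      by_cases hk : pvPow 3 (PySem.Int.floordiv (lo + hi) 2) (PySem.Int.floordiv (lo + hi) 2 + w) < n
      · rw [if_pos hk]
        have := ih (PySem.Int.floordiv (lo + hi) 2 + 1) hi
        omega
      · rw [if_neg hk]
        exact ih lo _
    · rw [if_neg hlt]

lemma pvBisect_exact {n w l0 : Int} (hw : 1 ≤ w) (hsol : pvG w l0 = n) :
    ∀ (fuel : Nat) (lo hi : Int), lo ≤ l0 → l0 ≤ hi → (hi - lo).toNat ≤ fuel →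
      pvBisect n w fuel lo hi = l0 := by
  intro fuel
  induction fuel with
  | zero =>
    intro lo hi h1 h2 hf
    simp only [pvBisect]
    omega
  | succ f ih =>
    intro lo hi h1 h2 hf
    simp only [pvBisect]
    by_cases hlt : lo < hi
    · rw [if_pos hlt]
      set mid := PySem.Int.floordiv (lo + hi) 2 with hmiddef
      obtain ⟨hm1, hm2⟩ : lo ≤ mid ∧ mid ≤ hi := PySem.Int.floordiv_two_mid_bounds (le_of_lt hlt)
      have hmidhi : mid < hi := by
        rw [hmiddef, PySem.Int.floordiv_lt_iff_lt_mul (by norm_num)]; omega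
      by_cases hk : pvPow 3 mid (mid + w) < n
      · rw [if_pos hk]
        have hgm : pvG w mid < pvG w l0 := by rw [hsol]; exact hk
        have hml0 : mid < l0 := (pvG_strictMono_l hw).lt_iff_lt.mp hgm
        exact ih (mid + 1) hi (by omega) h2 (by omega)
      · rw [if_neg hk]
        push_neg at hk
        have hl0m : l0 ≤ mid := by
          by_contra hcon
          push_neg at hcon
          have hx : pvG w mid < pvG w l0 := pvG_strictMono_l hw hcon
          rw [hsol] at hx
          exact absurd hk (by exact not_le.mpr hx)
        exact ih lo mid h1 hl0m (by omega)
    · rw [if_neg hlt]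
      omega

-- the key the final sort uses
lemma loopA_inv (n : Int) : ∀ (m : Nat) (a : Int) (ans : List (Int × Int × Int)),
    (n + 1 - a).toNat = m → 1 ≤ a →
    (∀ t, t ∈ ans ↔ IsSol n t ∧ t.2.2 - t.2.1 + 1 < a) →
    ans.Pairwise (fun u v => u.2.2 - u.2.1 < v.2.2 - v.2.1) →
    (∀ t, t ∈ pvLoopA n m a ans ↔ IsSol n t) ∧
      (pvLoopA n m a ans).Pairwise
        (fun u v => u.2.2 - u.2.1 < v.2.2 - v.2.1) := by
  intro m
  induction m with
  | zero =>
    intro a ans hm ha hmem hpw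
    simp only [pvLoopA]
    refine ⟨?_, hpw⟩
    intro t
    rw [hmem t]
    refine ⟨fun h => h.1, fun h => ⟨h, ?_⟩⟩
    have := (sol_width_le h).1
    omega
  | succ m ih =>
    intro a ans hm ha hmem hpw
    have han : a ≤ n := by omega
    simp only [pvLoopA]
    by_cases hbrk : n < pvPow 3 1 (a + 1)
    · rw [if_pos hbrk]
      refine ⟨?_, hpw⟩
      intro t
      rw [hmem t]
      refine ⟨fun h => h.1, fun h => ⟨h, ?_⟩⟩
      by_contra hge
      push_neg at hge
      have h2 := (sol_width_le h).2
      have h3 : pvG a 1 ≤ pvG (t.2.2 - t.2.1 + 1) 1 :=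
        pvG_mono_w le_rfl (by omega) hge
      have h4 : pvG a 1 = pvPow 3 1 (a + 1) := by unfold pvG; rw [add_comm]
      rw [h4] at h3
      linarith
    · rw [if_neg hbrk]
      push_neg at hbrk
      by_cases hmod : PySem.Int.mod (4 * n) a ≠ 0
      · rw [if_pos hmod]
        apply ih (a + 1) ans (by omega) (by omega) ?_ hpw
        intro t
        rw [hmem t]
        constructor
        · rintro ⟨hsol, hw⟩; exact ⟨hsol, by omega⟩
        · rintro ⟨hsol, hw⟩
          refine ⟨hsol, ?_⟩
          rcases lt_or_eq_of_le (show t.2.2 - t.2.1 + 1 ≤ a by omega) with h | h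
          · exact h
          · exfalso
            obtain ⟨he, h1, h2, h3⟩ := hsol
            rw [h] at h3
            have hd : a ∣ 4 * n := h3 ▸ w_dvd_four_pvG a t.2.1
            exact hmod ((PySem.Int.mod_eq_zero_iff_dvd _ _).mpr hd)
      · rw [if_neg hmod]
        push_neg at hmod
        set R := pvDoubleR n a (n.toNat + 2) 1 with hRdef
        set L := pvBisect n a R.toNat 1 (R + 1) with hLdef
        have hRspec := pvDoubleR_spec (n := n) (w := a) (show (1:Int) ≤ a by omega) (n.toNat + 2) 1 le_rfl (by omega)
        rw [← hRdef] at hRspec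
        by_cases hex : ∃ l0, 1 ≤ l0 ∧ pvG a l0 = n
        · obtain ⟨l0, hl01, hgl0⟩ := hex
          have hl0R : l0 < R := by
            have hx : pvG a l0 < pvG a R := by rw [hgl0]; exact hRspec.2
            exact (pvG_strictMono_l (show (1:Int) ≤ a by omega)).lt_iff_lt.mp hx
          have hLeq : L = l0 := by
            rw [hLdef]
            exact pvBisect_exact (show (1:Int) ≤ a by omega) hgl0 R.toNat 1 (R + 1)
              hl01 (by omega) (by omega)
          have hif : pvPow 3 L (L + a) = n := by rw [hLeq]; exact hgl0
          rw [if_pos hif]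
          apply ih (a + 1) (ans ++ [(3, L, L + a - 1)]) (by omega) (by omega) ?_ ?_
          · intro t
            rw [List.mem_append, hmem t, List.mem_singleton]
            constructor
            · rintro (⟨hsol, hw⟩ | rfl)
              · exact ⟨hsol, by omega⟩
              · refine ⟨⟨rfl, by simp; omega, by simp; omega, ?_⟩, by simp; omega⟩
                show pvG (L + a - 1 - L + 1) L = n
                rw [show L + a - 1 - L + 1 = a by ring, hLeq]
                exact hgl0
            · rintro ⟨hsol, hwlt⟩
              rcases lt_or_eq_of_le (show t.2.2 - t.2.1 + 1 ≤ a by omega) with h | h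
              · exact Or.inl ⟨hsol, h⟩
              · right
                obtain ⟨he, h1, h2, h3⟩ := hsol
                rw [h] at h3
                have hst : t.2.1 = l0 :=
                  (pvG_strictMono_l (show (1:Int) ≤ a by omega)).injective (by rw [h3, hgl0])
                have h22 : t.2.2 = L + a - 1 := by omega
                have hts : t = (t.1, t.2.1, t.2.2) := rfl
                rw [hts, he, hst, h22, hLeq]
          · refine List.pairwise_append.mpr ⟨hpw, List.pairwise_singleton _ _, ?_⟩
            intro u hu v hv
            rw [List.mem_singleton] at hv
            subst hv
            have hu2 := (hmem u).mp hu
            simp only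
            omega
        · push_neg at hex
          have hL1 : 1 ≤ L := by rw [hLdef]; exact pvBisect_ge n a R.toNat 1 (R + 1)
          have hif : ¬ (pvPow 3 L (L + a) = n) := hex L hL1
          rw [if_neg hif]
          apply ih (a + 1) ans (by omega) (by omega) ?_ hpw
          intro t
          rw [hmem t]
          constructor
          · rintro ⟨hsol, hw⟩; exact ⟨hsol, by omega⟩
          · rintro ⟨hsol, hw⟩
            refine ⟨hsol, ?_⟩
            rcases lt_or_eq_of_le (show t.2.2 - t.2.1 + 1 ≤ a by omega) with h | h
            · exact h
            · exfalso
              obtain ⟨he, h1, h2, h3⟩ := hsol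
              rw [h] at h3
              exact hex t.2.1 h1 h3

lemma loopB_inv (n : Int) : ∀ (fuel : Nat) (l r s : Int) (ans : List (Int × Int × Int)),
    1 ≤ l → l ≤ r → (r ≤ n + 1 ∨ r = 1) → s = pvG (r - l) l →
    (∀ b, l ≤ b → b < r → pvG (b - l) l < n) →
    (∀ t, t ∈ ans ↔ IsSol n t ∧ t.2.1 < l) →
    ans.Pairwise (fun u v => u.2.1 < v.2.1) →
    (2 * n + 4 - l - r).toNat ≤ fuel →
    (∀ t, t ∈ pvLoopB n fuel l r s ans ↔ IsSol n t) ∧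
      (pvLoopB n fuel l r s ans).Pairwise (fun u v => u.2.1 < v.2.1) := by
  intro fuel
  induction fuel with
  | zero =>
    intro l r s ans hl hlr hrb hs hpre hmem hpw hfuel
    simp only [pvLoopB]
    have hlr2 : l = r := by
      rcases hrb with h | h
      · omega
      · omega
    have hcube : n < l ^ 3 := by
      have h2 : l ≤ l ^ 3 := self_le_cube hl
      omega
    refine ⟨?_, hpw⟩
    intro t
    rw [hmem t]
    exact ⟨fun h => h.1, fun h => ⟨h, sol_start_lt hl hcube h⟩⟩
  | succ f ih =>
    intro l r s ans hl hlr hrb hs hpre hmem hpw hfuel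
    simp only [pvLoopB]
    by_cases hstop : l = r ∧ n < l * l * l
    · rw [if_pos hstop]
      have hcube : n < l ^ 3 := by
        have : l ^ 3 = l * l * l := by ring
        omega
      refine ⟨?_, hpw⟩
      intro t
      rw [hmem t]
      exact ⟨fun h => h.1, fun h => ⟨h, sol_start_lt hl hcube h⟩⟩
    · rw [if_neg hstop]
      by_cases hlt : s < n
      · rw [if_pos hlt]
        have hrn : r ≤ n := by
          rcases eq_or_lt_of_le hlr with he | hltlr
          · have hs0 : s = 0 := by rw [hs, ← he, sub_self, pvG_zero]
            have hnc : ¬ n < l * l * l := fun hc => hstop ⟨he, hc⟩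
            have h2 : l ≤ l ^ 3 := self_le_cube hl
            have h3 : l ^ 3 = l * l * l := by ring
            omega
          · have hdec : s = pvG (r - 1 - l) l + (r - 1) ^ 3 := by
              rw [hs, show r - l = (r - 1 - l) + 1 by ring, pvG_succ_w,
                show l + (r - 1 - l) = r - 1 by ring]
            have hnn : 0 ≤ pvG (r - 1 - l) l := pvG_nonneg hl (by omega)
            have hc : r - 1 ≤ (r - 1) ^ 3 := self_le_cube (by omega)
            omega
        apply ih l (r + 1) (s + r * r * r) ans hl (by omega) (Or.inl (by omega)) ?_ ?_ hmem hpw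
          (by omega)
        · rw [show r + 1 - l = (r - l) + 1 by ring, pvG_succ_w, ← hs,
            show l + (r - l) = r by ring]
          ring
        · intro b hb1 hb2
          rcases lt_or_eq_of_le (show b ≤ r by omega) with h | h
          · exact hpre b hb1 h
          · rw [h, ← hs]
            exact hlt
      · rw [if_neg hlt]
        push_neg at hlt
        have hlltr : l < r := by
          rcases eq_or_lt_of_le hlr with he | h
          · exfalso
            have hs0 : s = 0 := by rw [hs, ← he, sub_self, pvG_zero]
            have hc : l ≤ l ^ 3 := self_le_cube hl
            have h3 : l ^ 3 = l * l * l := by ring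
            have hnc : ¬ n < l * l * l := fun hc2 => hstop ⟨he, hc2⟩
            omega
          · exact h
        have hrn1 : r ≤ n + 1 := by rcases hrb with h | h <;> omega
        have hsum : s - l * l * l = pvG (r - (l + 1)) (l + 1) := by
          have h1 : pvG (r - l - 1) (l + 1) = pvG (r - l - 1) l + (l + (r - l - 1)) ^ 3 - l ^ 3 :=
            pvG_succ_l _ _
          have h2 := pvG_succ_w (r - l - 1) l
          rw [show r - l - 1 + 1 = r - l by ring] at h2
          have h3 : l ^ 3 = l * l * l := by ring
          rw [show r - (l + 1) = r - l - 1 by ring, h1, ← h3]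
          linarith [hs, h2]
        have hpre' : ∀ b, l + 1 ≤ b → b < r → pvG (b - (l + 1)) (l + 1) < n := by
          intro b hb1 hb2
          have ha : pvG (b - l - 1) (l + 1) = pvG (b - l - 1) l + (l + (b - l - 1)) ^ 3 - l ^ 3 :=
            pvG_succ_l _ _
          have hb := pvG_succ_w (b - l - 1) l
          rw [show b - l - 1 + 1 = b - l by ring] at hb
          have h2 := hpre b (by omega) hb2
          have h3 : l ≤ l ^ 3 := self_le_cube hl
          rw [show b - (l + 1) = b - l - 1 by ring]
          linarith
        by_cases heq : s = n
        · rw [if_pos heq]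
          apply ih (l + 1) r (s - l * l * l) (ans ++ [(3, l, r - 1)]) (by omega) (by omega) hrb
            hsum hpre' ?_ ?_ (by omega)
          · intro t
            rw [List.mem_append, hmem t, List.mem_singleton]
            constructor
            · rintro (⟨hsol, hlt2⟩ | rfl)
              · exact ⟨hsol, by omega⟩
              · refine ⟨⟨rfl, hl, by simp; omega, ?_⟩, by simp⟩
                show pvG (r - 1 - l + 1) l = n
                rw [show r - 1 - l + 1 = r - l by ring, ← hs]
                exact heq
            · rintro ⟨hsol, hlt2⟩
              by_cases hstart : t.2.1 = l
              · right
                obtain ⟨he, h1, h2, h3⟩ := hsol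
                rw [hstart] at h3
                have hwid : t.2.2 - l + 1 = r - l := by
                  by_contra hne
                  rcases lt_or_gt_of_ne hne with hlt3 | hgt3
                  · have hp := hpre (t.2.2 + 1) (by omega) (by omega)
                    rw [show t.2.2 + 1 - l = t.2.2 - l + 1 by ring] at hp
                    linarith
                  · have hst2 : pvG (r - l) l < pvG (t.2.2 - l + 1) l :=
                      pvG_strict_w hl (by omega) (by omega)
                    rw [h3] at hst2
                    have hx : pvG (r - l) l = n := by rw [← hs, heq]
                    linarith
                have h22 : t.2.2 = r - 1 := by omega
                have hts : t = (t.1, t.2.1, t.2.2) := rfl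
                rw [hts, he, hstart, h22]
              · left
                exact ⟨hsol, by omega⟩
          · refine List.pairwise_append.mpr ⟨hpw, List.pairwise_singleton _ _, ?_⟩
            intro u hu v hv
            rw [List.mem_singleton] at hv
            subst hv
            have hu2 := (hmem u).mp hu
            simpa using hu2.2
        · rw [if_neg heq]
          have hsn : n < s := by omega
          apply ih (l + 1) r (s - l * l * l) ans (by omega) (by omega) hrb hsum hpre' ?_ hpw
            (by omega)
          intro t
          rw [hmem t]
          constructor
          · rintro ⟨hsol, h⟩; exact ⟨hsol, by omega⟩
          · rintro ⟨hsol, h⟩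
            refine ⟨hsol, ?_⟩
            by_contra hge
            have hstart : t.2.1 = l := by omega
            obtain ⟨he, h1, h2, h3⟩ := hsol
            rw [hstart] at h3
            have hw0 : t.2.2 - l + 1 < r - l := by
              by_contra hge2
              push_neg at hge2
              have hmw : pvG (r - l) l ≤ pvG (t.2.2 - l + 1) l := pvG_mono_w hl (by omega) hge2
              rw [h3, ← hs] at hmw
              linarith
            have hp := hpre (t.2.2 + 1) (by omega) (by omega)
            rw [show t.2.2 + 1 - l = t.2.2 - l + 1 by ring] at hp
            linarith

-- ===== VERDICT (by name: the statement is the Claim_ definition above) =====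
theorem solve_3_spec : Claim_equal_solve_3 := by
  intro n _
  unfold Spec_solve_3
  have hA := loopA_inv n n.toNat 1 [] (by omega) le_rfl
    (by intro t; simp; intro h; have := h.2.1; have := h.2.2.1; omega) List.Pairwise.nil
  have hB := loopB_inv n (2 * n + 4).toNat 1 1 0 [] le_rfl le_rfl (Or.inr rfl)
    (by simpa using (pvG_zero 1).symm) (by intro b h1 h2; omega)
    (by intro t; simp; intro h; have := h.2.1; omega) List.Pairwise.nil (by omega)
  have hnodupA : (solve_3 n).Nodup := by
    refine (hA.2.imp ?_)
    intro u v h; rintro rfl; exact lt_irrefl _ h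
  have hnodupB : (pvLoopB n (2 * n + 4).toNat 1 1 0 []).Nodup := by
    refine (hB.2.imp ?_)
    intro u v h; rintro rfl; exact lt_irrefl _ h
  have hperm : (solve_3 n).Perm (pvLoopB n (2 * n + 4).toNat 1 1 0 []) := by
    rw [List.perm_ext_iff_of_nodup hnodupA hnodupB]
    intro t
    rw [show (t ∈ solve_3 n) = (t ∈ pvLoopA n n.toNat 1 []) from rfl]
    rw [hA.1 t, hB.1 t]
  have hpw : (solve_3 n).Pairwise (fun u v => u.2.2 - u.2.1 < v.2.2 - v.2.1) := hA.2
  exact (PySem.List.sorted_eq_of_perm_of_pairwise_lt (pvLoopB n (2 * n + 4).toNat 1 1 0 []) (solve_3 n) (fun t => t.2.2 - t.2.1) hperm hpw).symm
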